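-- pv_equiv track=rewrite | github.com/lamer64ick/UNI-projects | python/modeling/test.py | cumsum_and_erase
-- ===== SOURCE A (Python) =====
-- def cumsum_and_erase(A, erase=1):
--     ln = len(A)
--     i = 0
--     while i < ln:
--         if i > 0:
--             A[i] += A[i-1]
--         ln = len(A)
--         i += 1
--     B = list(filter(lambda x: x != erase, A))
--     return B
-- ===== SOURCE B (Python) =====
-- def cumsum_and_erase(A, erase=1):
--     # Subtractive reverse scan: total sum once, then walk right-to-left;
--     # the running value IS the prefix sum at i, recovered by subtraction.
--     running = sum(A)
--     out = []
--     for i in range(len(A) - 1, -1, -1):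
--         v = A[i]
--         A[i] = running
--         if running != erase:
--             out.append(running)
--         running -= v
--     out.reverse()
--     return out
-- ===== Notes on version B (the rewrite author's own statement) =====
-- stated objective: alternative
-- what changed: Replaces the forward cumulative-sum loop plus filter by a subtractive algorithm: it sums the list once, then traverses it right-to-left, recovering each prefix sum by subtracting the original element from the running total, collecting survivors back-to-front and reversing at the end.
import Mathlib
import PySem

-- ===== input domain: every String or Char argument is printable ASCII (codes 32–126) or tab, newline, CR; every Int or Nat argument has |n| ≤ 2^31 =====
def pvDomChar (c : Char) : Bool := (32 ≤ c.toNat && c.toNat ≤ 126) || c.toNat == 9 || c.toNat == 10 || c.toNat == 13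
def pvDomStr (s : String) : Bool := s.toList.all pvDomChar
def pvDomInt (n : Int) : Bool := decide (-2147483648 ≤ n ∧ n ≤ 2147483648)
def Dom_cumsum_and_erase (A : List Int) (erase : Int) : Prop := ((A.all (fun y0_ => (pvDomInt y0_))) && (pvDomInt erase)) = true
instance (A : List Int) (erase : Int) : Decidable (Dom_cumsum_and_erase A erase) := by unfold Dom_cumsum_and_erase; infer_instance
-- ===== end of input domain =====

-- B replaces A's forward cumsum loop + filter by a subtractive right-to-left scan from the total
-- sum, building the output back-to-front (alternative algorithm, same cost); equivalence is about
-- the RETURN value (both Pythons also mutate A to its cumulative sums identically).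

-- ===== PORT A =====
-- while i < ln loop: A[i] += A[i-1] for i > 0; len(A) never changes, so the loop
-- runs i = 0 .. len-1; indices i and i-1 are always in range, so getD is exact.
def cumsum_and_erase_loop (l : List Int) (i : Nat) : List Int :=
  if h : i < l.length then
    let l' := if i > 0 then l.set i (l.getD i 0 + l.getD (i-1) 0) else l
    cumsum_and_erase_loop l' (i+1)
  else l
termination_by l.length - i
decreasing_by
  split
  · simp only [List.length_set]; omega
  · omega

def cumsum_and_erase (A : List Int) (erase : Int) : List Int :=
  (cumsum_and_erase_loop A 0).filter (fun x => x != erase)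

-- ===== PORT B =====
-- the reversed-index for-loop over A with state (running, out) is the foldr over A
-- (elements are consumed right-to-left, exactly as range(len(A)-1, -1, -1) does)
def cumsum_and_erase_alt (A : List Int) (erase : Int) : List Int :=
  ((A.foldr (fun v (p : Int × List Int) =>
      (p.1 - v, if p.1 != erase then p.2 ++ [p.1] else p.2)) (A.sum, [])).2).reverse

-- ===== PRECONDITION & SPEC =====
def Spec_cumsum_and_erase (A : List Int) (erase : Int) (out : List Int) : Prop := out = cumsum_and_erase_alt A erase
instance (A : List Int) (erase : Int) (out : List Int) : Decidable (Spec_cumsum_and_erase A erase out) := by unfold Spec_cumsum_and_erase; infer_instance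

-- ===== CLAIM (what is proved, stated in full; the proofs are below) =====
def Claim_equal_cumsum_and_erase : Prop := ∀ (A : List Int) (erase : Int), Dom_cumsum_and_erase A erase → Spec_cumsum_and_erase A erase (cumsum_and_erase A erase)

-- ===== LEMMAS AND PROOFS =====

-- prefix sums starting from accumulator acc
def psum (acc : Int) : List Int → List Int
  | [] => []
  | x :: xs => (acc + x) :: psum (acc + x) xs

theorem loop_inv (rest d : List Int) (acc : Int) :
    cumsum_and_erase_loop (d ++ acc :: rest) (d.length + 1) = d ++ acc :: psum acc rest := by
  induction rest generalizing d acc with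
  | nil =>
      unfold cumsum_and_erase_loop
      simp [psum]
  | cons x xs ih =>
      unfold cumsum_and_erase_loop
      have hlen : d.length + 1 < (d ++ acc :: x :: xs).length := by simp
      simp only [hlen, dif_pos, Nat.add_sub_cancel]
      have hget1 : (d ++ acc :: x :: xs).getD (d.length + 1) 0 = x := by
        simp [List.getD_eq_getElem?_getD]
      have hget0 : (d ++ acc :: x :: xs).getD d.length 0 = acc := by
        simp [List.getD_eq_getElem?_getD]
      have hset : (d ++ acc :: x :: xs).set (d.length + 1) (x + acc)
          = (d ++ [acc]) ++ (x + acc) :: xs := by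
        rw [List.set_append_right _ _ (by omega)]
        simp
      simp only [Nat.zero_lt_succ, if_pos, hget1, hget0, hset]
      have := ih (d ++ [acc]) (x + acc)
      simp only [List.length_append, List.length_cons, List.length_nil] at this
      rw [this]
      simp [psum, add_comm x acc]

theorem loopA_eq_psum (A : List Int) : cumsum_and_erase_loop A 0 = psum 0 A := by
  cases A with
  | nil => unfold cumsum_and_erase_loop; simp [psum]
  | cons x xs =>
      unfold cumsum_and_erase_loop
      simp only [List.length_cons, Nat.zero_lt_succ, dif_pos, gt_iff_lt, Nat.lt_irrefl,
        if_false, Nat.zero_add]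
      have := loop_inv xs [] x
      simp only [List.length_nil, Nat.zero_add, List.nil_append] at this
      rw [this]
      simp [psum]

-- the subtractive reverse scan: started at acc + xs.sum it returns acc, and collects the
-- filtered prefix sums of xs (offset acc) in reverse order, appended to out
theorem foldrB (erase acc : Int) (xs out : List Int) :
    xs.foldr (fun v (p : Int × List Int) =>
        (p.1 - v, if p.1 != erase then p.2 ++ [p.1] else p.2)) (acc + xs.sum, out)
    = (acc, out ++ ((psum acc xs).filter (fun x => x != erase)).reverse) := by
  induction xs generalizing acc out with
  | nil => simp [psum]
  | cons x xs ih =>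
      simp only [List.foldr_cons, List.sum_cons, psum, List.filter_cons]
      have h : acc + (x + xs.sum) = (acc + x) + xs.sum := by ring
      rw [h, ih (acc + x) out]
      by_cases hx : (acc + x) != erase <;> simp [hx]

-- ===== VERDICT (by name: the statement is the Claim_ definition above) =====
theorem cumsum_and_erase_spec : Claim_equal_cumsum_and_erase := by
  intro A erase _
  unfold Spec_cumsum_and_erase cumsum_and_erase cumsum_and_erase_alt
  have := foldrB erase 0 A []
  rw [zero_add] at this
  rw [loopA_eq_psum, this]
  simp
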